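-- pv_equiv track=rewrite | github.com/zhaizhongyuan/AccuComp4LLM | exprs_gen.py | _generate_bin_dist
-- ===== SOURCE A (Python) =====
-- from typing import List, Tuple, Sequence, Optional, Dict, Any  # [CHANGED]
--
-- def _generate_bin_dist(max_ops: int) -> List[List[int]]:
--     catalans = [1]
--     for i in range(1, 2*max_ops + 1):
--         catalans.append((4*i - 2) * catalans[i - 1] // (i + 1))
--     D: List[List[int]] = []
--     for e in range(max_ops + 2):
--         row = []
--         for n in range(2*max_ops + 2):
--             if e == 0:
--                 row.append(0)
--             elif e == 1:
--                 row.append(catalans[n] if n < len(catalans) else 0)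
--             else:
--                 v1 = D[e-1][n+1] if (e-1) < len(D) and (n+1) < len(D[e-1]) else 0
--                 v2 = D[e-2][n+1] if (e-2) >= 0 and (e-2) < len(D) and (n+1) < len(D[e-2]) else 0
--                 row.append(max(v1 - v2, 0))
--         D.append(row)
--     return D
-- ===== SOURCE B (Python) =====
-- def _generate_bin_dist(max_ops):
--     catalans = [1]
--     for i in range(1, 2 * max_ops + 1):
--         catalans.append((4 * i - 2) * catalans[i - 1] // (i + 1))
--     height = max_ops + 2
--     width = 2 * max_ops + 2
--     # Build the table column by column, right to left: the entry at (e, n)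
--     # depends only on the column n+1, so a single rolling column suffices.
--     col = [0] * max(height, 0)  # virtual all-zero column just past the right edge
--     cols = []
--     for n in range(width - 1, -1, -1):
--         new = []
--         for e in range(max(height, 0)):
--             if e == 0:
--                 new.append(0)
--             elif e == 1:
--                 new.append(catalans[n] if n < len(catalans) else 0)
--             else:
--                 new.append(max(col[e - 1] - col[e - 2], 0))
--         cols.append(new)
--         col = new
--     cols.reverse()
--     return [[cols[n][e] for n in range(width)] for e in range(max(height, 0))]
-- ===== Notes on version B (the rewrite author's own statement) =====
-- stated objective: alternative
-- what changed: A's bottom-up row-by-row fill with bounds-checked lookups into the growing table is replaced by a right-to-left column sweep that keeps only one rolling previous column (the entry (e,n) depends only on column n+1), followed by a transpose.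
import Mathlib
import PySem

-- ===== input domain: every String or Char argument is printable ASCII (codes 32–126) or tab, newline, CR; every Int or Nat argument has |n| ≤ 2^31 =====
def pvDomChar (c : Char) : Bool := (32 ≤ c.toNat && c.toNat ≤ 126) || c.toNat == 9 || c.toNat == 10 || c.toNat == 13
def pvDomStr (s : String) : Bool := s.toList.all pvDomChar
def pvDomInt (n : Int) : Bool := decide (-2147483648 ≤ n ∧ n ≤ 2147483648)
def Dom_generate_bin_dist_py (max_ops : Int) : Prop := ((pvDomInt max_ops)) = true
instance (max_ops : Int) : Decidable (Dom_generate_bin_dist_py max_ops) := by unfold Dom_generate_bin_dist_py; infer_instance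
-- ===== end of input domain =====

-- B replaces A's bottom-up row fill (with bounds-checked lookups into the growing table) by a
-- right-to-left column sweep keeping one rolling column, then a transpose (objective: alternative).

-- shared helper: both Pythons build the Catalan prefix with this identical loop
-- (catalans[i-1] is in range at every iteration, so pyGetD's default is unreachable — exact)
def pyCatalans (max_ops : Int) : List Int :=
  (PySem.List.pyRange 1 (2 * max_ops + 1) 1).foldl
    (fun c i => c ++ [PySem.Int.floordiv ((4 * i - 2) * PySem.List.pyGetD c (i - 1) 0) (i + 1)])
    [1]

-- ===== PORT A =====
-- inner loop of A: builds row e from the already-built rows D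
-- (Python indexes D[e-1] / D[e-2] only under the in-range guards, so pyGetD's default is unreachable — exact)
def aInner (catalans : List Int) (max_ops : Int) (D : List (List Int)) (e : Int) : List Int :=
  (PySem.List.pyRange 0 (2 * max_ops + 2) 1).foldl
    (fun row n =>
      if e = 0 then row ++ [0]
      else if e = 1 then
        row ++ [if n < (catalans.length : Int) then PySem.List.pyGetD catalans n 0 else 0]
      else
        let v1 := if e - 1 < (D.length : Int) ∧
                     n + 1 < ((PySem.List.pyGetD D (e - 1) []).length : Int)
                  then PySem.List.pyGetD (PySem.List.pyGetD D (e - 1) []) (n + 1) 0 else 0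
        let v2 := if 0 ≤ e - 2 ∧ e - 2 < (D.length : Int) ∧
                     n + 1 < ((PySem.List.pyGetD D (e - 2) []).length : Int)
                  then PySem.List.pyGetD (PySem.List.pyGetD D (e - 2) []) (n + 1) 0 else 0
        row ++ [max (v1 - v2) 0])
    []

def generate_bin_dist_py (max_ops : Int) : List (List Int) :=
  let catalans := pyCatalans max_ops
  (PySem.List.pyRange 0 (max_ops + 2) 1).foldl
    (fun D e => D ++ [aInner catalans max_ops D e]) []

-- ===== PORT B =====
-- one new column of B's right-to-left sweep, computed from the rolling previous column `col`
-- (col[e-1] / col[e-2] are in range for every visited e, so pyGetD's default is unreachable — exact)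
def bCol (catalans : List Int) (max_ops : Int) (col : List Int) (n : Int) : List Int :=
  (PySem.List.pyRange 0 (max (max_ops + 2) 0) 1).foldl
    (fun new e =>
      if e = 0 then new ++ [0]
      else if e = 1 then
        new ++ [if n < (catalans.length : Int) then PySem.List.pyGetD catalans n 0 else 0]
      else
        new ++ [max (PySem.List.pyGetD col (e - 1) 0 - PySem.List.pyGetD col (e - 2) 0) 0])
    []

def generate_bin_dist_py_alt (max_ops : Int) : List (List Int) :=
  let catalans := pyCatalans max_ops
  let height := max_ops + 2
  let width := 2 * max_ops + 2
  let loop := (PySem.List.pyRange (width - 1) (-1) (-1)).foldl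
      (fun s n => let new := bCol catalans max_ops s.2 n; (s.1 ++ [new], new))
      (([] : List (List Int)), List.replicate (max height 0).toNat (0 : Int))
  let colsR := loop.1.reverse
  (PySem.List.pyRange 0 (max height 0) 1).map (fun e =>
    (PySem.List.pyRange 0 width 1).map (fun n =>
      PySem.List.pyGetD (PySem.List.pyGetD colsR n []) e 0))

-- ===== PRECONDITION & SPEC =====
def Spec_generate_bin_dist_py (max_ops : Int) (out : List (List Int)) : Prop := out = generate_bin_dist_py_alt max_ops
instance (max_ops : Int) (out : List (List Int)) : Decidable (Spec_generate_bin_dist_py max_ops out) := by unfold Spec_generate_bin_dist_py; infer_instance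

-- ===== CLAIM (what is proved, stated in full; the proofs are below) =====
def Claim_equal_generate_bin_dist_py : Prop := ∀ (max_ops : Int), Dom_generate_bin_dist_py max_ops → Spec_generate_bin_dist_py max_ops (generate_bin_dist_py max_ops)

-- ===== LEMMAS AND PROOFS =====

-- length of a fold that appends one element per iteration (step may read the accumulator)
theorem foldl_append_one_length {α β : Type} (g : List β → α → β) (l : List α) (init : List β) :
    (l.foldl (fun c i => c ++ [g c i]) init).length = init.length + l.length := by
  induction l generalizing init with
  | nil => simp
  | cons a l ih => simp [List.foldl_cons, ih]; omega

-- a three-branch loop body that appends one element per iteration, fused into a map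
theorem foldl_if3_append {α β : Type} (p q : α → Prop) [DecidablePred p] [DecidablePred q]
    (f1 f2 f3 : α → β) (l : List α) (acc : List β) :
    l.foldl (fun r x => if p x then r ++ [f1 x] else if q x then r ++ [f2 x] else r ++ [f3 x]) acc
      = acc ++ l.map (fun x => if p x then f1 x else if q x then f2 x else f3 x) := by
  induction l generalizing acc with
  | nil => simp
  | cons a l ih =>
    simp only [List.foldl_cons, List.map_cons]
    split_ifs <;> (rw [ih]; simp)

theorem pyCatalans_length (m : Int) (hm : 0 ≤ m) : ((pyCatalans m).length : Int) = 2 * m + 1 := by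
  unfold pyCatalans
  rw [foldl_append_one_length]
  simp [PySem.List.length_pyRange_one]
  omega

-- the common table entry: Tfun m e n is row e, column n of the table both programs build
def Tfun (m : Int) : Nat → Nat → Int
  | 0, _ => 0
  | 1, n => if (n : Int) < ((pyCatalans m).length : Int) then (pyCatalans m).getD n 0 else 0
  | e + 2, n =>
      if (n : Int) + 1 < 2 * m + 2 then
        max (Tfun m (e + 1) (n + 1) - Tfun m e (n + 1)) 0
      else 0

def rowSpec (m : Int) (e : Nat) : List Int := (List.range (2 * m + 2).toNat).map (fun n => Tfun m e n)
def colSpec (m : Int) (n : Nat) : List Int := (List.range (m + 2).toNat).map (fun e => Tfun m e n)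

theorem Tfun_edge (m : Int) (hm : 0 ≤ m) (e : Nat) : Tfun m e (2 * m + 2).toNat = 0 := by
  match e with
  | 0 => rfl
  | 1 =>
    unfold Tfun
    rw [if_neg]
    rw [pyCatalans_length m hm]
    omega
  | e + 2 =>
    unfold Tfun
    rw [if_neg]
    omega

theorem A_inner (m : Int) (hm : 0 ≤ m) (e : Nat) :
    aInner (pyCatalans m) m ((List.range e).map (rowSpec m)) (e : Int) = rowSpec m e := by
  simp only [aInner]
  refine Eq.trans (foldl_if3_append _ _ _ _ _ _ _) ?_
  rw [List.nil_append, PySem.List.pyRange_one, List.map_map]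
  unfold rowSpec
  simp only [sub_zero]
  refine List.map_congr_left ?_
  intro k hk
  rw [List.mem_range] at hk
  simp only [Function.comp_apply, zero_add]
  match e with
  | 0 => norm_num [Tfun]
  | 1 => norm_num [Tfun, PySem.List.pyGetD_natCast]
  | e + 2 =>
    rw [if_neg (by omega : ¬((e + 2 : Nat) : Int) = 0),
        if_neg (by omega : ¬((e + 2 : Nat) : Int) = 1),
        show ((e + 2 : Nat) : Int) - 1 = ((e + 1 : Nat) : Int) by push_cast; ring,
        show ((e + 2 : Nat) : Int) - 2 = ((e : Nat) : Int) by push_cast; ring,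
        PySem.List.pyGetD_natCast, PySem.List.pyGetD_natCast,
        PySem.List.getD_map_range _ _ _ _ (by omega : e + 1 < e + 2),
        PySem.List.getD_map_range _ _ _ _ (by omega : e < e + 2)]
    simp only [List.length_map, List.length_range]
    by_cases hg : (k : Int) + 1 < 2 * m + 2
    · rw [if_pos ⟨by omega, by omega⟩, if_pos ⟨by omega, by omega, by omega⟩,
          show ((k : Int) + 1) = ((k + 1 : Nat) : Int) by push_cast; ring,
          PySem.List.pyGetD_natCast, PySem.List.pyGetD_natCast,
          PySem.List.getD_map_range _ _ _ _ (by omega : k + 1 < (2 * m + 2).toNat),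
          PySem.List.getD_map_range _ _ _ _ (by omega : k + 1 < (2 * m + 2).toNat)]
      simp only [Tfun]
      rw [if_pos hg]
    · rw [if_neg (by rintro ⟨-, h2⟩; omega), if_neg (by rintro ⟨-, -, h2⟩; omega)]
      simp only [Tfun]
      rw [if_neg hg]
      norm_num

theorem A_outer (m : Int) (hm : 0 ≤ m) : ∀ (d j : Nat), (j : Int) + d = m + 2 →
    (PySem.List.pyRange (j : Int) (m + 2) 1).foldl
      (fun D e => D ++ [aInner (pyCatalans m) m D e]) ((List.range j).map (rowSpec m))
    = (List.range (j + d)).map (rowSpec m) := by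
  intro d
  induction d with
  | zero =>
    intro j hj
    rw [PySem.List.pyRange_one_eq_nil (by omega)]
    simp
  | succ d ih =>
    intro j hj
    rw [PySem.List.pyRange_one_cons (by omega), List.foldl_cons, A_inner m hm j]
    have h1 : (List.range j).map (rowSpec m) ++ [rowSpec m j] = (List.range (j + 1)).map (rowSpec m) := by
      rw [List.range_succ]; simp
    rw [h1, show ((j : Int) + 1) = ((j + 1 : Nat) : Int) by push_cast; ring,
        ih (j + 1) (by push_cast; push_cast at hj; omega),
        show j + 1 + d = j + (d + 1) from by omega]

theorem A_eq (m : Int) (hm : 0 ≤ m) :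
    generate_bin_dist_py m = (List.range (m + 2).toNat).map (rowSpec m) := by
  have h := A_outer m hm (m + 2).toNat 0 (by omega)
  simp only [Nat.cast_zero, List.range_zero, List.map_nil, zero_add] at h
  unfold generate_bin_dist_py
  simpa using h

theorem colSpec_edge (m : Int) (hm : 0 ≤ m) :
    colSpec m (2 * m + 2).toNat = List.replicate (max (m + 2) 0).toNat 0 := by
  unfold colSpec
  rw [List.eq_replicate_iff]
  constructor
  · simp; omega
  · intro b hb
    simp only [List.mem_map, List.mem_range] at hb
    obtain ⟨e, _, he⟩ := hb
    rw [← he, Tfun_edge m hm]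

theorem B_inner (m : Int) (hm : 0 ≤ m) (n : Nat) (hn : (n : Int) < 2 * m + 2) :
    bCol (pyCatalans m) m (colSpec m (n + 1)) (n : Int) = colSpec m n := by
  simp only [bCol, max_eq_left (show (0 : Int) ≤ m + 2 by omega)]
  refine Eq.trans (foldl_if3_append _ _ _ _ _ _ _) ?_
  rw [List.nil_append, PySem.List.pyRange_one, List.map_map]
  unfold colSpec
  simp only [sub_zero]
  refine List.map_congr_left ?_
  intro eN heN
  rw [List.mem_range] at heN
  simp only [Function.comp_apply, zero_add]
  match eN with
  | 0 => norm_num [Tfun]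
  | 1 => norm_num [Tfun, PySem.List.pyGetD_natCast]
  | e + 2 =>
    rw [if_neg (by omega : ¬((e + 2 : Nat) : Int) = 0),
        if_neg (by omega : ¬((e + 2 : Nat) : Int) = 1),
        show ((e + 2 : Nat) : Int) - 1 = ((e + 1 : Nat) : Int) by push_cast; ring,
        show ((e + 2 : Nat) : Int) - 2 = ((e : Nat) : Int) by push_cast; ring,
        PySem.List.pyGetD_natCast, PySem.List.pyGetD_natCast,
        PySem.List.getD_map_range _ _ _ _ (by omega : e + 1 < (m + 2).toNat),
        PySem.List.getD_map_range _ _ _ _ (by omega : e < (m + 2).toNat)]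
    by_cases hg : (n : Int) + 1 < 2 * m + 2
    · simp only [Tfun]
      rw [if_pos hg]
    · rw [show n + 1 = (2 * m + 2).toNat by omega, Tfun_edge m hm, Tfun_edge m hm]
      simp only [Tfun]
      rw [if_neg hg]
      norm_num

theorem B_loop (m : Int) (hm : 0 ≤ m) : ∀ (j : Nat), (j : Int) ≤ 2 * m + 2 → ∀ (acc : List (List Int)),
    (PySem.List.pyRange ((j : Int) - 1) (-1) (-1)).foldl
      (fun s n => (s.1 ++ [bCol (pyCatalans m) m s.2 n], bCol (pyCatalans m) m s.2 n))
      (acc, colSpec m j)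
    = (acc ++ ((List.range j).reverse.map (colSpec m)), colSpec m 0) := by
  intro j
  induction j with
  | zero =>
    intro _ acc
    rw [PySem.List.pyRange_neg_one_eq_nil (by omega)]
    simp
  | succ j ih =>
    intro hj acc
    rw [show ((j + 1 : Nat) : Int) - 1 = (j : Int) by push_cast; ring,
        PySem.List.pyRange_neg_one_cons (by omega), List.foldl_cons]
    simp only [B_inner m hm j (by push_cast at hj ⊢; omega)]
    rw [ih (by push_cast at hj ⊢; omega) (acc ++ [colSpec m j])]
    rw [List.range_succ]
    simp [List.append_assoc]

theorem B_eq (m : Int) (hm : 0 ≤ m) :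
    generate_bin_dist_py_alt m = (List.range (m + 2).toNat).map (rowSpec m) := by
  have hmax : max (m + 2) 0 = m + 2 := max_eq_left (by omega)
  simp only [generate_bin_dist_py_alt, hmax]
  rw [show List.replicate ((m + 2).toNat) (0 : Int) = colSpec m (2 * m + 2).toNat by
        rw [colSpec_edge m hm, hmax],
      show (2 * m + 2 - 1 : Int) = ((2 * m + 2).toNat : Int) - 1 by omega,
      B_loop m hm (2 * m + 2).toNat (by omega) []]
  simp only [List.nil_append, List.map_reverse, List.reverse_reverse]
  rw [PySem.List.pyRange_one 0 (m + 2), List.map_map]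
  simp only [sub_zero]
  refine List.map_congr_left ?_
  intro eN heN
  rw [List.mem_range] at heN
  simp only [Function.comp_apply, zero_add]
  unfold rowSpec
  rw [PySem.List.pyRange_one 0 (2 * m + 2), List.map_map]
  simp only [sub_zero]
  refine List.map_congr_left ?_
  intro nN hnN
  rw [List.mem_range] at hnN
  simp only [Function.comp_apply, zero_add]
  rw [PySem.List.pyGetD_natCast, PySem.List.pyGetD_natCast,
      PySem.List.getD_map_range _ _ _ _ hnN]
  unfold colSpec
  rw [PySem.List.getD_map_range _ _ _ _ heN]

-- ===== VERDICT (by name: the statement is the Claim_ definition above) =====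
theorem generate_bin_dist_py_spec : Claim_equal_generate_bin_dist_py := by
  intro m _
  unfold Spec_generate_bin_dist_py
  by_cases hm : 0 ≤ m
  · rw [A_eq m hm, B_eq m hm]
  · by_cases hm1 : m = -1
    · subst hm1; decide
    · have h2 : m + 2 ≤ 0 := by omega
      unfold generate_bin_dist_py generate_bin_dist_py_alt
      rw [PySem.List.pyRange_one_eq_nil (by omega)]
      simp only [List.foldl_nil]
      rw [show max (m + 2) 0 = 0 from max_eq_right h2]
      rw [PySem.List.pyRange_one_eq_nil (by omega)]
      simp
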